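/- GENERATED by mk_final_copies.py from the proof of the farm's unit `codebook_decode_scalar_raw.3` (farm:codebook_decode_scalar_raw.3.1: Lemmas.lean) as the
   re-elaboration sweep compiled it — do not edit. -/
import Asan.CheckWalk
import Vorbis.Spec.Units.codebook_decode_scalar_raw_3

/-!
  Pure facts for unit `codebook_decode_scalar_raw.3` (the linear search of codebook_decode_scalar_raw): the loop counter
  `r12d = i`, the element addresses `codeword_lengths + i`, `codewords + 4 i`, and V1 after `valid_bits -= len`.
-/

namespace Vorbis.Spec.codebook_decode_scalar_raw_3
open X86 X86.User Asan Vorbis Vorbis.Spec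

/-- The number of a small counter held in a register. -/
theorem toNat_ofNat_small (i : Nat) (h : i < 2 ^ 64) : (UInt64.ofNat i).toNat = i := by
  rw [UInt64.toNat_ofNat']
  omega

/-- `add r12d, 1` (0x10d7d8, C line 1724 `++i`): the counter `i < 2^24` becomes `i + 1`. -/
theorem r12_next (i : Nat) (h : i < 2 ^ 24) :
    Word.ofBV (Word.part .w32 (UInt64.ofNat i) + 1#32) = UInt64.ofNat (i + 1) := by
  apply UInt64.toNat_inj.mp
  rw [Vorbis.toNat_ofBV32, BitVec.toNat_add, Vorbis.toNat_part32, toNat_ofNat_small i (by omega),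
    toNat_ofNat_small (i + 1) (by omega)]
  have e1 : (1#32).toNat = 1 := by decide
  rw [e1]
  omega

/-- The signed value of the counter in `r12d`, as compared by `cmp [rsp+0x18], r12d` (0x10d7dc). -/
theorem counter_toInt (i : Nat) (h : i < 2 ^ 31) : (Word.part .w32 (UInt64.ofNat i)).toInt = (i : Int) := by
  rw [part32_toInt, toNat_ofNat_small i (by omega)]
  have e : i % 2 ^ 32 = i := Nat.mod_eq_of_lt (by omega)
  rw [e]
  have := sint32_cases i
  omega

/-- The signed value of the cached `c->entries` (`[rsp+0x18]`), as compared at 0x10d7dc. -/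
theorem entries_toInt (n : Nat) (h : n < 2 ^ 31) : (BitVec.ofNat 32 n).toInt = (n : Int) := by
  rw [toInt_ofNat32 n (by omega)]
  have := sint32_cases n
  omega

/-- `movsxd r13, r12d` of the counter: the counter itself. -/
theorem sext_counter (i : Nat) (h : i < 2 ^ 31) :
    Word.ofBV (BitVec.signExtend 64 (Word.part .w32 (UInt64.ofNat i))) = UInt64.ofNat i := by
  apply UInt64.toNat_inj.mp
  have hlow : (Word.part .w32 (UInt64.ofNat i)).toNat < 2 ^ 31 := by
    rw [Vorbis.toNat_part32, toNat_ofNat_small i (by omega)]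
    omega
  rw [toNat_sext32 _ hlow, Vorbis.toNat_part32, toNat_ofNat_small i (by omega)]
  omega

/-- `movsxd r13, r12d ; mov rbx, r13 ; add rbx, [rbp+8]` (0x10d7f0, C line 1725): the address of `codeword_lengths[i]`. -/
theorem addr_length (i p : Nat) (hi : i < 2 ^ 31) (hp : p + i < 2 ^ 64) :
    (Word.ofBV (BitVec.signExtend 64 (Word.part .w32 (UInt64.ofNat i))) + UInt64.ofNat p).toNat = p + i := by
  rw [sext_counter i hi, UInt64.toNat_add, toNat_ofNat_small i (by omega), toNat_ofNat_small p (by omega)]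
  omega

/-- `lea r14, [rax + r13*4]` (0x10d80f, C line 1726): the address of `codewords[i]`. -/
theorem addr_codeword (i p : Nat) (hi : i < 2 ^ 31) (hp : p + 4 * i < 2 ^ 64) :
    (UInt64.ofNat p + Word.ofBV (BitVec.signExtend 64 (Word.part .w32 (UInt64.ofNat i))) * 4).toNat = p + 4 * i := by
  rw [sext_counter i hi, UInt64.toNat_add, UInt64.toNat_mul, toNat_ofNat_small i (by omega),
    toNat_ofNat_small p (by omega)]
  have e4 : (4 : UInt64).toNat = 4 := by decide
  rw [e4]
  omega

/-- **`Bits` and μ over stores that stay off `*f` or inside `eof`/`error` or `acc`** (the linear search writes its own frame,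
`f->acc`, and — through `error` — `f->error`): the windows are each off the object, inside `[f+136, f+144)`, or inside
`[f+1764, f+1768)`. -/
theorem reader_windows {Blk : Block → Prop} {len : Nat} {mem mem' : Mem} {f : Nat} {ws : List Span}
    (h : Bits Blk len mem f) (hs : Mem.SameExcept ws mem mem')
    (hoff : ∀ w, w ∈ ws → (w.hi ≤ f ∨ f + 1808 ≤ w.lo) ∨ (f + 136 ≤ w.lo ∧ w.hi ≤ f + 144) ∨
      (f + 1764 ≤ w.lo ∧ w.hi ≤ f + 1768)) :
    Bits Blk len mem' f ∧ mu mem' f = mu mem f := by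
  have hr := h.OBR
  simp only [voff] at hr
  have sf : Bits.SameFields mem mem' f := by
    apply Bits.SameFields.of_sameExcept hs
    all_goals
      intro w hw
      have := hoff w hw
      omega
  have hB : Mem.EqOn (f + 1748) (f + 1749) mem mem' := by
    apply hs.eqOn
    intro w hw
    have := hoff w hw
    omega
  exact ⟨h.frame_fields sf, Reader.mu_frame_fields (by omega) sf hB⟩

/-- **The reader's post at an exit of the linear search**: the memory is `M` — reached from the segment's entry memory `m` by
stores as in `reader_windows` — with a last store of `valid_bits` (0x10d7c6, 0x10d899, 0x10d8ce) whose value satisfies V1. -/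
theorem exit_reader {Blk : Block → Prop} {len : Nat} {m0 m M : Mem} {f : Nat} {ws : List Span}
    (hr : ReaderPost Blk len m0 m f) (hs : Mem.SameExcept ws m M)
    (hoff : ∀ w, w ∈ ws → (w.hi ≤ f ∨ f + 1808 ≤ w.lo) ∨ (f + 136 ≤ w.lo ∧ w.hi ≤ f + 144) ∨
      (f + 1764 ≤ w.lo ∧ w.hi ≤ f + 1768))
    (a : Word) (ha : a = addr (f + 1768)) (x : BitVec 32) (hx : -1 ≤ x.toInt ∧ x.toInt ≤ 32) :
    ReaderPost Blk len m0 (M.writeLE a 4 x.toNat) f := by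
  obtain ⟨hb1, hmu1⟩ := reader_windows hr.bits hs hoff
  subst ha
  have hst := hb1.store_valid_bits x hx
  have hmu2 := hb1.mu_store_other 1768 4 x.toNat (by omega) (by omega) (by omega) (by omega) (by omega) (by omega)
  refine ⟨hst.1, ?_⟩
  rw [hmu2, hmu1]
  exact hr.mu_le

/-- **The frame facts (`Mid`) at an exit**, from those at the segment's entry `u`: the slots of the return address and of the six
saved registers (`[e.rsp − 48, e.rsp + 8)`) read the same; the other fields are given. -/
theorem mid_carry {u₀ : State} {s : Spec} {entry ret : Word} {e u v : State} {sp : Word}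
    (h : Mid u₀ s entry ret e sp u) (hroom : 48 ≤ (e.reg .rsp).toNat) (htop : (e.reg .rsp).toNat + 8 < 2 ^ 64)
    (hEq : Mem.EqOn ((e.reg .rsp).toNat - 48) ((e.reg .rsp).toNat + 8) u.mem v.mem)
    (hrsp : v.reg .rsp = sp) (hsame : Mem.SameExcept (s.footprint e) e.mem v.mem) (hcode : CodeOK u₀ v.mem)
    (hinv : abiInv v) (hun : ShadowUntouched e.mem v.mem) : Mid u₀ s entry ret e sp v := by
  obtain ⟨he, _, hra, h15, h14, h13, h12, hbp, hbx, _, _, _, _⟩ := h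
  refine ⟨he, hrsp, ?_, ?_, ?_, ?_, ?_, ?_, ?_, hsame, hcode, hinv, hun⟩
  · rw [hEq.readLE (e.reg .rsp) 8 (by omega) (by omega) (by omega)]
    exact hra
  · rw [hEq.readLE (e.reg .rsp - 8) 8 (by u_omega) (by u_omega) (by u_omega)]
    exact h15
  · rw [hEq.readLE (e.reg .rsp - 16) 8 (by u_omega) (by u_omega) (by u_omega)]
    exact h14
  · rw [hEq.readLE (e.reg .rsp - 24) 8 (by u_omega) (by u_omega) (by u_omega)]
    exact h13
  · rw [hEq.readLE (e.reg .rsp - 32) 8 (by u_omega) (by u_omega) (by u_omega)]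
    exact h12
  · rw [hEq.readLE (e.reg .rsp - 40) 8 (by u_omega) (by u_omega) (by u_omega)]
    exact hbp
  · rw [hEq.readLE (e.reg .rsp - 48) 8 (by u_omega) (by u_omega) (by u_omega)]
    exact hbx

/-- **The fields of the struct at `c` read the same at the function's entry and at the segment's entry**: the footprint so far
(the own frame and windows of `*f`) does not meet the struct. -/
theorem book_same {m0 m : Mem} {c : Nat} {ws : List Span} (hs : Mem.SameExcept ws m0 m)
    (hc : c + 2120 < 2 ^ 64)
    (hoff : ∀ w, w ∈ ws → c + 2120 ≤ w.lo ∨ w.hi ≤ c) : Codebook.SameFields m0 m c := by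
  apply Codebook.SameFields.of_same
  · simp only [voff]
    omega
  · simp only [voff]
    exact hs.eqOn _ _ hoff

/-- `mov r12d, 0xffffffff` (C lines 1733, 1739 `return -1`): the result −1. -/
theorem result_m1 : argInt (Word.ofBV 0xFFFFFFFF#32) = -1 := by
  decide

/-- The length byte as the machine compares it (`movzx eax, bl ; mov [rsp+0x1c], eax ; cmp [rsp+0x1c], r15d`). -/
theorem len_toNat (lb : Nat) :
    (BitVec.zeroExtend 32 (BitVec.setWidth 8 (BitVec.zeroExtend 32 (BitVec.ofNat 8 lb)))).toNat = lb % 256 := by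
  simp only [BitVec.toNat_setWidth, BitVec.toNat_ofNat, BitVec.truncate_eq_setWidth]
  omega

/-- **V1 after `f->valid_bits -= c->codeword_lengths[i]`** (0x10d896 – 0x10d899, C line 1729), under the test of C line 1727
(`jg` at 0x10d870 not taken: `valid_bits ≥ len`). -/
theorem v1_after_sub (vbv lb : Nat) (hv : vbv < 2 ^ 32) (hV1 : -1 ≤ sint32 vbv ∧ sint32 vbv ≤ 32)
    (hbr : ¬ (BitVec.ofNat 32 vbv).toInt < (BitVec.ofNat 32
      ((BitVec.zeroExtend 32 (BitVec.setWidth 8 (BitVec.zeroExtend 32 (BitVec.ofNat 8 lb)))).toNat %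
        4294967296)).toInt) :
    -1 ≤ (BitVec.ofNat 32 vbv - BitVec.zeroExtend 32 (BitVec.ofNat 8 lb)).toInt ∧
      (BitVec.ofNat 32 vbv - BitVec.zeroExtend 32 (BitVec.ofNat 8 lb)).toInt ≤ 32 := by
  rw [len_toNat] at hbr
  have e2 : lb % 256 % 4294967296 = lb % 256 := by omega
  rw [e2, toInt_ofNat32 _ hv, toInt_ofNat32 _ (by omega)] at hbr
  have c1 := sint32_cases vbv
  have c2 := sint32_cases (lb % 256)
  rw [BitVec.toInt_eq_toNat_cond, BitVec.toNat_sub, BitVec.toNat_ofNat, BitVec.toNat_setWidth, BitVec.toNat_ofNat]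
  split <;> omega

/-- `return i` (C line 1730): the counter in r12d, as the signed result. -/
theorem result_i (i : Nat) (h : i < 2 ^ 31) : argInt (UInt64.ofNat i) = (i : Int) := by
  unfold argInt
  rw [toNat_ofNat_small i (by omega)]
  have e : i % 2 ^ 32 = i := Nat.mod_eq_of_lt (by omega)
  rw [e]
  have := sint32_cases i
  omega

end Vorbis.Spec.codebook_decode_scalar_raw_3
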